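-- pv_equiv track=rewrite | github.com/onikw/Owner-avatar-Introduction_to_computer_science_course | Zestaw3/z19.py | f
-- ===== SOURCE A (Python) =====
-- def f(tab):
--     ind=0
--     suma=0
--     sumaind=0
--     maks=0
--
--     for i in range(len(tab)-1):
--         suma=tab[i]
--         sumaind=i
--         ind=0
--         while  i+ind+1<len(tab) and tab[i+ind]<tab[i+ind+1]:
--             suma+=tab[i+ind+1]
--             sumaind+=i+ind+1
--             ind+=1
--         if(sumaind==suma):
--             maks=max(maks,suma)
--
--     return maks
-- ===== SOURCE B (Python) =====
-- def f(tab):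
--     n = len(tab)
--     if n < 2:
--         return 0
--     maks = 0
--     sv = tab[n - 1]
--     si = n - 1
--     for i in range(n - 2, -1, -1):
--         if tab[i] < tab[i + 1]:
--             sv += tab[i]
--             si += i
--         else:
--             sv = tab[i]
--             si = i
--         if sv == si and sv > maks:
--             maks = sv
--     return maks
-- ===== Notes on version B (the rewrite author's own statement) =====
-- stated objective: faster
-- what changed: A restarts an inner while loop at every start index to re-sum the increasing run; B makes a single backward pass that maintains the running value-sum and index-sum of the current increasing run, checking each start once.
import Mathlib
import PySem

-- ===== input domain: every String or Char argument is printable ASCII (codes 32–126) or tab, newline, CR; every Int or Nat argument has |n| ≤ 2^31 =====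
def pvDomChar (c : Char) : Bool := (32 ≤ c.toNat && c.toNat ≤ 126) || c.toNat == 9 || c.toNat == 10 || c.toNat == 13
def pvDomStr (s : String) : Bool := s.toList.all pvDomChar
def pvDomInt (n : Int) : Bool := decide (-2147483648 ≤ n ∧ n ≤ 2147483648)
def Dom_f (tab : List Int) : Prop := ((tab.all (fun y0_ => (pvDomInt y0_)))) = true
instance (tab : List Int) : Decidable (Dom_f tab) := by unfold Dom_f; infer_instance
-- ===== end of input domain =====

-- B replaces A's per-start inner while loop by ONE backward pass that maintains the
-- running sums of the current increasing run (objective: faster, O(n^2) → O(n)).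

-- ===== PORT A =====
-- the inner while loop of A: extends the increasing run starting at i, accumulating
-- the value sum (suma) and the index sum (sumaind)
def fInner (tab : List Int) (i ind : Nat) (suma sumaind : Int) : Int × Int :=
  if h : i + ind + 1 < tab.length ∧ tab.getD (i + ind) 0 < tab.getD (i + ind + 1) 0 then
    fInner tab i (ind + 1) (suma + tab.getD (i + ind + 1) 0)
      (sumaind + ((i : Int) + (ind : Int) + 1))
  else (suma, sumaind)
termination_by tab.length - (i + ind)
decreasing_by omega

def f (tab : List Int) : Int :=
  (List.range (tab.length - 1)).foldl
    (fun maks i =>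
      let p := fInner tab i 0 (tab.getD i 0) (i : Int)
      if p.2 = p.1 then max maks p.1 else maks) 0

-- ===== PORT B =====
-- one step of B's backward loop; state = (sv, si, maks)
def bStep (tab : List Int) (st : Int × Int × Int) (i : Nat) : Int × Int × Int :=
  let sv := if tab.getD i 0 < tab.getD (i + 1) 0 then st.1 + tab.getD i 0 else tab.getD i 0
  let si := if tab.getD i 0 < tab.getD (i + 1) 0 then st.2.1 + (i : Int) else (i : Int)
  (sv, si, if sv = si ∧ st.2.2 < sv then sv else st.2.2)

def f_alt (tab : List Int) : Int :=
  let n := tab.length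
  if n < 2 then 0
  else
    ((List.range (n - 1)).reverse.foldl (bStep tab)
      (tab.getD (n - 1) 0, (n : Int) - 1, 0)).2.2

-- ===== PRECONDITION & SPEC =====
def Spec_f (tab : List Int) (out : Int) : Prop := out = f_alt tab
instance (tab : List Int) (out : Int) : Decidable (Spec_f tab out) := by unfold Spec_f; infer_instance

-- ===== CLAIM (what is proved, stated in full; the proofs are below) =====
def Claim_equal_f : Prop := ∀ (tab : List Int), Dom_f tab → Spec_f tab (f tab)

-- ===== LEMMAS AND PROOFS =====

-- (value sum, index sum) of the maximal increasing run starting at i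
def P (tab : List Int) (i : Nat) : Int × Int :=
  if _h : i + 1 < tab.length ∧ tab.getD i 0 < tab.getD (i + 1) 0 then
    ((P tab (i + 1)).1 + tab.getD i 0, (P tab (i + 1)).2 + (i : Int))
  else (tab.getD i 0, (i : Int))
termination_by tab.length - i
decreasing_by omega

-- canonical per-start contribution to the maximum
def aStep (tab : List Int) (maks : Int) (i : Nat) : Int :=
  if (P tab i).2 = (P tab i).1 then max maks (P tab i).1 else maks

lemma P_pos (tab : List Int) (i : Nat) (h1 : i + 1 < tab.length)
    (h2 : tab.getD i 0 < tab.getD (i + 1) 0) :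
    P tab i = ((P tab (i + 1)).1 + tab.getD i 0, (P tab (i + 1)).2 + (i : Int)) := by
  rw [P, dif_pos ⟨h1, h2⟩]

lemma P_neg (tab : List Int) (i : Nat)
    (h : ¬ (i + 1 < tab.length ∧ tab.getD i 0 < tab.getD (i + 1) 0)) :
    P tab i = (tab.getD i 0, (i : Int)) := by
  rw [P, dif_neg h]

lemma fInner_eq (tab : List Int) :
    ∀ fuel i ind (s t : Int), tab.length - (i + ind) ≤ fuel →
      fInner tab i ind s t
        = (s - tab.getD (i + ind) 0 + (P tab (i + ind)).1,
           t - ((i + ind : Nat) : Int) + (P tab (i + ind)).2) := by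
  intro fuel
  induction fuel with
  | zero =>
    intro i ind s t hf
    have hn : ¬ (i + ind + 1 < tab.length ∧ tab.getD (i + ind) 0 < tab.getD (i + ind + 1) 0) := by
      rintro ⟨h1, _⟩; omega
    rw [fInner, dif_neg hn, P_neg tab (i + ind) hn]
    simp only [Prod.mk.injEq]
    constructor <;> ring
  | succ fuel ih =>
    intro i ind s t hf
    by_cases h : i + ind + 1 < tab.length ∧ tab.getD (i + ind) 0 < tab.getD (i + ind + 1) 0
    · rw [fInner, dif_pos h, P_pos tab (i + ind) h.1 h.2]
      have heq := ih i (ind + 1) (s + tab.getD (i + ind + 1) 0)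
        (t + ((i : Int) + (ind : Int) + 1)) (by omega)
      have harr : i + (ind + 1) = i + ind + 1 := by omega
      rw [harr] at heq
      rw [heq]
      simp only [Prod.mk.injEq]
      constructor
      · ring
      · push_cast; ring
    · rw [fInner, dif_neg h, P_neg tab (i + ind) h]
      simp only [Prod.mk.injEq]
      constructor <;> ring

lemma fInner_P (tab : List Int) (i : Nat) :
    fInner tab i 0 (tab.getD i 0) (i : Int) = P tab i := by
  have := fInner_eq tab (tab.length) i 0 (tab.getD i 0) (i : Int) (by omega)
  simpa using this

lemma if_max (sv si m : Int) :
    (if sv = si ∧ m < sv then sv else m) = (if si = sv then max m sv else m) := by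
  by_cases he : sv = si
  · rw [if_pos he.symm]
    by_cases hm : m < sv
    · rw [if_pos ⟨he, hm⟩, max_eq_right hm.le]
    · rw [if_neg (fun hh => hm hh.2), max_eq_left (not_lt.mp hm)]
  · rw [if_neg (fun hh => he hh.1), if_neg (fun hh => he hh.symm)]

lemma bStep_P (tab : List Int) (i : Nat) (m : Int) (hi : i + 1 < tab.length) :
    bStep tab ((P tab (i + 1)).1, (P tab (i + 1)).2, m) i
      = ((P tab i).1, (P tab i).2, aStep tab m i) := by
  unfold bStep aStep
  by_cases h : tab.getD i 0 < tab.getD (i + 1) 0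
  · rw [P_pos tab i hi h]
    simp only [if_pos h, Prod.mk.injEq]
    exact ⟨trivial, trivial, if_max _ _ _⟩
  · rw [P_neg tab i (fun hh => h hh.2)]
    simp only [if_neg h, Prod.mk.injEq]
    exact ⟨trivial, trivial, if_max _ _ _⟩

lemma range_reverse_succ (j : Nat) :
    (List.range (j + 1)).reverse = j :: (List.range j).reverse := by
  rw [List.range_succ, List.reverse_append]; rfl

lemma bFold (tab : List Int) :
    ∀ (j : Nat) (m : Int), j + 1 < tab.length →
      (List.range (j + 1)).reverse.foldl (bStep tab)
          ((P tab (j + 1)).1, (P tab (j + 1)).2, m)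
        = ((P tab 0).1, (P tab 0).2,
           (List.range (j + 1)).reverse.foldl (aStep tab) m) := by
  intro j
  induction j with
  | zero =>
    intro m hj
    have h0 : (List.range 1).reverse = [0] := rfl
    rw [h0]
    simp only [List.foldl_cons, List.foldl_nil]
    rw [bStep_P tab 0 m hj]
  | succ j ih =>
    intro m hj
    rw [range_reverse_succ (j + 1)]
    simp only [List.foldl_cons]
    rw [bStep_P tab (j + 1) m hj, ih (aStep tab m (j + 1)) (by omega)]

lemma aStep_comm (tab : List Int) (m : Int) (a b : Nat) :
    aStep tab (aStep tab m a) b = aStep tab (aStep tab m b) a := by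
  unfold aStep
  split_ifs <;> first | rfl | rw [max_right_comm]

lemma foldl_aStep_perm (tab : List Int) {l l' : List Nat} (h : l.Perm l') (m : Int) :
    l.foldl (aStep tab) m = l'.foldl (aStep tab) m :=
  h.foldl_eq' (fun a _ b _ m => aStep_comm tab m a b) m

lemma f_eq_fold (tab : List Int) :
    f tab = (List.range (tab.length - 1)).foldl (aStep tab) 0 := by
  unfold f
  refine List.foldl_ext _ _ 0 (fun m i _ => ?_)
  simp only [fInner_P]
  rfl

-- ===== VERDICT (by name: the statement is the Claim_ definition above) =====
theorem f_spec : Claim_equal_f := by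
  intro tab _
  unfold Spec_f f_alt
  by_cases hn : tab.length < 2
  · rw [if_pos hn, f_eq_fold]
    have : tab.length - 1 = 0 := by omega
    rw [this]; rfl
  · rw [if_neg hn]
    have h1 : tab.length - 2 + 1 = tab.length - 1 := by omega
    have h2 : tab.length - 2 + 1 < tab.length := by omega
    have hinit : (tab.getD (tab.length - 1) 0, (tab.length : Int) - 1, (0 : Int))
        = ((P tab (tab.length - 1)).1, (P tab (tab.length - 1)).2, (0 : Int)) := by
      rw [P, dif_neg (by rintro ⟨h, _⟩; omega)]
      have : (((tab.length - 1 : Nat) : Int)) = (tab.length : Int) - 1 := by omega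
      rw [this]
    rw [hinit, f_eq_fold, ← h1, bFold tab (tab.length - 2) 0 (h1 ▸ h2)]
    exact (foldl_aStep_perm tab (List.reverse_perm _) 0).symm
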